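-- pv_equiv track=rewrite | github.com/lovistics/HoopSenseApp | server/data/processors/transformer.py | get_team_colors
-- ===== SOURCE A (Python) =====
-- from typing import Dict, Any, List, Optional, Tuple, Union
--
-- def get_team_colors(team_name: str) -> Tuple[str, str]:
--     """
--     Get primary and secondary colors for a team.
--
--     Args:
--         team_name: Team name
--
--     Returns:
--         Tuple of (primary_color, secondary_color)
--     """
--     # NBA team colors map (primary, secondary)
--     colors_map = {
--         "Atlanta Hawks": ("#E03A3E", "#C1D32F"),
--         "Boston Celtics": ("#007A33", "#BA9653"),
--         "Brooklyn Nets": ("#000000", "#FFFFFF"),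
--         "Charlotte Hornets": ("#1D1160", "#00788C"),
--         "Chicago Bulls": ("#CE1141", "#000000"),
--         "Cleveland Cavaliers": ("#860038", "#FDBB30"),
--         "Dallas Mavericks": ("#00538C", "#B8C4CA"),
--         "Denver Nuggets": ("#0E2240", "#FEC524"),
--         "Detroit Pistons": ("#C8102E", "#1D42BA"),
--         "Golden State Warriors": ("#1D428A", "#FFC72C"),
--         "Houston Rockets": ("#CE1141", "#000000"),
--         "Indiana Pacers": ("#002D62", "#FDBB30"),
--         "Los Angeles Clippers": ("#C8102E", "#1D428A"),
--         "Los Angeles Lakers": ("#552583", "#FDB927"),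
--         "Memphis Grizzlies": ("#5D76A9", "#12173F"),
--         "Miami Heat": ("#98002E", "#F9A01B"),
--         "Milwaukee Bucks": ("#00471B", "#EEE1C6"),
--         "Minnesota Timberwolves": ("#0C2340", "#236192"),
--         "New Orleans Pelicans": ("#0C2340", "#C8102E"),
--         "New York Knicks": ("#006BB6", "#F58426"),
--         "Oklahoma City Thunder": ("#007AC1", "#EF3B24"),
--         "Orlando Magic": ("#0077C0", "#C4CED4"),
--         "Philadelphia 76ers": ("#006BB6", "#ED174C"),
--         "Phoenix Suns": ("#1D1160", "#E56020"),
--         "Portland Trail Blazers": ("#E03A3E", "#000000"),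
--         "Sacramento Kings": ("#5A2D81", "#63727A"),
--         "San Antonio Spurs": ("#C4CED4", "#000000"),
--         "Toronto Raptors": ("#CE1141", "#000000"),
--         "Utah Jazz": ("#002B5C", "#00471B"),
--         "Washington Wizards": ("#002B5C", "#E31837")
--     }
--
--     # Look for exact match first
--     if team_name in colors_map:
--         return colors_map[team_name]
--
--     # Try to find by partial match
--     for known_name, colors in colors_map.items():
--         # Extract the distinct part of the team name (e.g., "Lakers" from "Los Angeles Lakers")
--         known_parts = known_name.split()
--         name_parts = team_name.split()
--
--         # Check for matches in the team name parts
--         for part in name_parts: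
--             if part in known_parts and len(part) > 3:  # Avoid matching on "The", "Los", etc.
--                 return colors
--
--     # Default colors if not found
--     return ("#004080", "#FDB927")  # Default blue and gold
-- ===== SOURCE B (Python) =====
-- # Team-colors lookup via precomputed static indices: name->position, word->earliest position, and a palette list.
-- from typing import Tuple
--
-- _POS = {
--     "Atlanta Hawks": 0,
--     "Boston Celtics": 1,
--     "Brooklyn Nets": 2,
--     "Charlotte Hornets": 3,
--     "Chicago Bulls": 4,
--     "Cleveland Cavaliers": 5,
--     "Dallas Mavericks": 6,
--     "Denver Nuggets": 7,
--     "Detroit Pistons": 8,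
--     "Golden State Warriors": 9,
--     "Houston Rockets": 10,
--     "Indiana Pacers": 11,
--     "Los Angeles Clippers": 12,
--     "Los Angeles Lakers": 13,
--     "Memphis Grizzlies": 14,
--     "Miami Heat": 15,
--     "Milwaukee Bucks": 16,
--     "Minnesota Timberwolves": 17,
--     "New Orleans Pelicans": 18,
--     "New York Knicks": 19,
--     "Oklahoma City Thunder": 20,
--     "Orlando Magic": 21,
--     "Philadelphia 76ers": 22,
--     "Phoenix Suns": 23,
--     "Portland Trail Blazers": 24,
--     "Sacramento Kings": 25,
--     "San Antonio Spurs": 26,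
--     "Toronto Raptors": 27,
--     "Utah Jazz": 28,
--     "Washington Wizards": 29,
-- }
--
-- _WORDS = {
--     "Atlanta": 0,
--     "Hawks": 0,
--     "Boston": 1,
--     "Celtics": 1,
--     "Brooklyn": 2,
--     "Nets": 2,
--     "Charlotte": 3,
--     "Hornets": 3,
--     "Chicago": 4,
--     "Bulls": 4,
--     "Cleveland": 5,
--     "Cavaliers": 5,
--     "Dallas": 6,
--     "Mavericks": 6,
--     "Denver": 7,
--     "Nuggets": 7,
--     "Detroit": 8,
--     "Pistons": 8,
--     "Golden": 9,
--     "State": 9,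
--     "Warriors": 9,
--     "Houston": 10,
--     "Rockets": 10,
--     "Indiana": 11,
--     "Pacers": 11,
--     "Los": 12,
--     "Angeles": 12,
--     "Clippers": 12,
--     "Lakers": 13,
--     "Memphis": 14,
--     "Grizzlies": 14,
--     "Miami": 15,
--     "Heat": 15,
--     "Milwaukee": 16,
--     "Bucks": 16,
--     "Minnesota": 17,
--     "Timberwolves": 17,
--     "New": 18,
--     "Orleans": 18,
--     "Pelicans": 18,
--     "York": 19,
--     "Knicks": 19,
--     "Oklahoma": 20,
--     "City": 20,
--     "Thunder": 20,
--     "Orlando": 21,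
--     "Magic": 21,
--     "Philadelphia": 22,
--     "76ers": 22,
--     "Phoenix": 23,
--     "Suns": 23,
--     "Portland": 24,
--     "Trail": 24,
--     "Blazers": 24,
--     "Sacramento": 25,
--     "Kings": 25,
--     "San": 26,
--     "Antonio": 26,
--     "Spurs": 26,
--     "Toronto": 27,
--     "Raptors": 27,
--     "Utah": 28,
--     "Jazz": 28,
--     "Washington": 29,
--     "Wizards": 29,
-- }
--
-- _PALETTE = [
--     ("#E03A3E", "#C1D32F"),
--     ("#007A33", "#BA9653"),
--     ("#000000", "#FFFFFF"),
--     ("#1D1160", "#00788C"),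
--     ("#CE1141", "#000000"),
--     ("#860038", "#FDBB30"),
--     ("#00538C", "#B8C4CA"),
--     ("#0E2240", "#FEC524"),
--     ("#C8102E", "#1D42BA"),
--     ("#1D428A", "#FFC72C"),
--     ("#CE1141", "#000000"),
--     ("#002D62", "#FDBB30"),
--     ("#C8102E", "#1D428A"),
--     ("#552583", "#FDB927"),
--     ("#5D76A9", "#12173F"),
--     ("#98002E", "#F9A01B"),
--     ("#00471B", "#EEE1C6"),
--     ("#0C2340", "#236192"),
--     ("#0C2340", "#C8102E"),
--     ("#006BB6", "#F58426"),
--     ("#007AC1", "#EF3B24"),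
--     ("#0077C0", "#C4CED4"),
--     ("#006BB6", "#ED174C"),
--     ("#1D1160", "#E56020"),
--     ("#E03A3E", "#000000"),
--     ("#5A2D81", "#63727A"),
--     ("#C4CED4", "#000000"),
--     ("#CE1141", "#000000"),
--     ("#002B5C", "#00471B"),
--     ("#002B5C", "#E31837"),
-- ]
--
--
-- def get_team_colors(team_name: str) -> Tuple[str, str]:
--     """Get primary and secondary colors for a team (precomputed-index version)."""
--     pos = _POS.get(team_name)
--     if pos is None:
--         hits = [_WORDS[p] for p in team_name.split() if len(p) > 3 and p in _WORDS]
--         pos = min(hits) if hits else None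
--     return _PALETTE[pos] if pos is not None else ("#004080", "#FDB927")
-- ===== Notes on version B (the rewrite author's own statement) =====
-- stated objective: faster
-- what changed: A's per-query nested scan (every team name split and compared against every query word) is replaced by three precomputed static tables - name->position, word->earliest team position, and a palette list - so a query does one dict lookup, then at most one index lookup per long query word and a min over small ints.
import Mathlib
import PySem

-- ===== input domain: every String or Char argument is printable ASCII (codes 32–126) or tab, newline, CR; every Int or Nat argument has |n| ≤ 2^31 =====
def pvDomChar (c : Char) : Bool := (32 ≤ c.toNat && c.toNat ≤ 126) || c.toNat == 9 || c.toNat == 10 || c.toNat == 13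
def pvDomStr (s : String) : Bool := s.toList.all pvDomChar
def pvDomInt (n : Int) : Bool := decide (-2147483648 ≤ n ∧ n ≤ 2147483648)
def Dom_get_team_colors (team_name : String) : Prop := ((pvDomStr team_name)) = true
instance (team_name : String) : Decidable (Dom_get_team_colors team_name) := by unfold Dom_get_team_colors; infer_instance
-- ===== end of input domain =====

-- B replaces A's per-query nested scan with three precomputed static tables (name->position,
-- word->earliest team position, palette list); equal colors are returned for every input (objective: faster).

-- ===== PORT A =====
def pvColorsMap : PySem.Dict String (String × String) := PySem.Dict.mk [
  ("Atlanta Hawks", ("#E03A3E", "#C1D32F")),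
  ("Boston Celtics", ("#007A33", "#BA9653")),
  ("Brooklyn Nets", ("#000000", "#FFFFFF")),
  ("Charlotte Hornets", ("#1D1160", "#00788C")),
  ("Chicago Bulls", ("#CE1141", "#000000")),
  ("Cleveland Cavaliers", ("#860038", "#FDBB30")),
  ("Dallas Mavericks", ("#00538C", "#B8C4CA")),
  ("Denver Nuggets", ("#0E2240", "#FEC524")),
  ("Detroit Pistons", ("#C8102E", "#1D42BA")),
  ("Golden State Warriors", ("#1D428A", "#FFC72C")),
  ("Houston Rockets", ("#CE1141", "#000000")),
  ("Indiana Pacers", ("#002D62", "#FDBB30")),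
  ("Los Angeles Clippers", ("#C8102E", "#1D428A")),
  ("Los Angeles Lakers", ("#552583", "#FDB927")),
  ("Memphis Grizzlies", ("#5D76A9", "#12173F")),
  ("Miami Heat", ("#98002E", "#F9A01B")),
  ("Milwaukee Bucks", ("#00471B", "#EEE1C6")),
  ("Minnesota Timberwolves", ("#0C2340", "#236192")),
  ("New Orleans Pelicans", ("#0C2340", "#C8102E")),
  ("New York Knicks", ("#006BB6", "#F58426")),
  ("Oklahoma City Thunder", ("#007AC1", "#EF3B24")),
  ("Orlando Magic", ("#0077C0", "#C4CED4")),
  ("Philadelphia 76ers", ("#006BB6", "#ED174C")),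
  ("Phoenix Suns", ("#1D1160", "#E56020")),
  ("Portland Trail Blazers", ("#E03A3E", "#000000")),
  ("Sacramento Kings", ("#5A2D81", "#63727A")),
  ("San Antonio Spurs", ("#C4CED4", "#000000")),
  ("Toronto Raptors", ("#CE1141", "#000000")),
  ("Utah Jazz", ("#002B5C", "#00471B")),
  ("Washington Wizards", ("#002B5C", "#E31837"))
]

def get_team_colors (team_name : String) : String × String :=
  match pvColorsMap.get? team_name with
  | some c => c
  | none =>
    match pvColorsMap.items.find? (fun kv =>
        (PySem.Str.split₀ team_name).any (fun part =>
          (PySem.Str.split₀ kv.1).contains part && decide (3 < PySem.Str.len part))) with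
    | some kv => kv.2
    | none => ("#004080", "#FDB927")

-- ===== PORT B =====
def pvPos : PySem.Dict String Int := PySem.Dict.mk [
  ("Atlanta Hawks", 0),
  ("Boston Celtics", 1),
  ("Brooklyn Nets", 2),
  ("Charlotte Hornets", 3),
  ("Chicago Bulls", 4),
  ("Cleveland Cavaliers", 5),
  ("Dallas Mavericks", 6),
  ("Denver Nuggets", 7),
  ("Detroit Pistons", 8),
  ("Golden State Warriors", 9),
  ("Houston Rockets", 10),
  ("Indiana Pacers", 11),
  ("Los Angeles Clippers", 12),
  ("Los Angeles Lakers", 13),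
  ("Memphis Grizzlies", 14),
  ("Miami Heat", 15),
  ("Milwaukee Bucks", 16),
  ("Minnesota Timberwolves", 17),
  ("New Orleans Pelicans", 18),
  ("New York Knicks", 19),
  ("Oklahoma City Thunder", 20),
  ("Orlando Magic", 21),
  ("Philadelphia 76ers", 22),
  ("Phoenix Suns", 23),
  ("Portland Trail Blazers", 24),
  ("Sacramento Kings", 25),
  ("San Antonio Spurs", 26),
  ("Toronto Raptors", 27),
  ("Utah Jazz", 28),
  ("Washington Wizards", 29)
]

def pvWords : PySem.Dict String Int := PySem.Dict.mk [
  ("Atlanta", 0),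
  ("Hawks", 0),
  ("Boston", 1),
  ("Celtics", 1),
  ("Brooklyn", 2),
  ("Nets", 2),
  ("Charlotte", 3),
  ("Hornets", 3),
  ("Chicago", 4),
  ("Bulls", 4),
  ("Cleveland", 5),
  ("Cavaliers", 5),
  ("Dallas", 6),
  ("Mavericks", 6),
  ("Denver", 7),
  ("Nuggets", 7),
  ("Detroit", 8),
  ("Pistons", 8),
  ("Golden", 9),
  ("State", 9),
  ("Warriors", 9),
  ("Houston", 10),
  ("Rockets", 10),
  ("Indiana", 11),
  ("Pacers", 11),
  ("Los", 12),
  ("Angeles", 12),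
  ("Clippers", 12),
  ("Lakers", 13),
  ("Memphis", 14),
  ("Grizzlies", 14),
  ("Miami", 15),
  ("Heat", 15),
  ("Milwaukee", 16),
  ("Bucks", 16),
  ("Minnesota", 17),
  ("Timberwolves", 17),
  ("New", 18),
  ("Orleans", 18),
  ("Pelicans", 18),
  ("York", 19),
  ("Knicks", 19),
  ("Oklahoma", 20),
  ("City", 20),
  ("Thunder", 20),
  ("Orlando", 21),
  ("Magic", 21),
  ("Philadelphia", 22),
  ("76ers", 22),
  ("Phoenix", 23),
  ("Suns", 23),
  ("Portland", 24),
  ("Trail", 24),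
  ("Blazers", 24),
  ("Sacramento", 25),
  ("Kings", 25),
  ("San", 26),
  ("Antonio", 26),
  ("Spurs", 26),
  ("Toronto", 27),
  ("Raptors", 27),
  ("Utah", 28),
  ("Jazz", 28),
  ("Washington", 29),
  ("Wizards", 29)
]

def pvPalette : List (String × String) := [
  ("#E03A3E", "#C1D32F"),
  ("#007A33", "#BA9653"),
  ("#000000", "#FFFFFF"),
  ("#1D1160", "#00788C"),
  ("#CE1141", "#000000"),
  ("#860038", "#FDBB30"),
  ("#00538C", "#B8C4CA"),
  ("#0E2240", "#FEC524"),
  ("#C8102E", "#1D42BA"),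
  ("#1D428A", "#FFC72C"),
  ("#CE1141", "#000000"),
  ("#002D62", "#FDBB30"),
  ("#C8102E", "#1D428A"),
  ("#552583", "#FDB927"),
  ("#5D76A9", "#12173F"),
  ("#98002E", "#F9A01B"),
  ("#00471B", "#EEE1C6"),
  ("#0C2340", "#236192"),
  ("#0C2340", "#C8102E"),
  ("#006BB6", "#F58426"),
  ("#007AC1", "#EF3B24"),
  ("#0077C0", "#C4CED4"),
  ("#006BB6", "#ED174C"),
  ("#1D1160", "#E56020"),
  ("#E03A3E", "#000000"),
  ("#5A2D81", "#63727A"),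
  ("#C4CED4", "#000000"),
  ("#CE1141", "#000000"),
  ("#002B5C", "#00471B"),
  ("#002B5C", "#E31837")
]

def get_team_colors_alt (team_name : String) : String × String :=
  let pos : Option Int :=
    match pvPos.get? team_name with
    | some i => some i
    | none =>
      let hits := (PySem.Str.split₀ team_name).filterMap (fun p =>
        if decide (3 < PySem.Str.len p) && pvWords.contains p then pvWords.get? p else none)
      PySem.List.min? hits (fun i => i)
  match pos with
  | some i => (PySem.List.pyGet? pvPalette i).getD ("#004080", "#FDB927")
      -- every stored position is 0..29, so the palette lookup never misses (Python never raises here)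
  | none => ("#004080", "#FDB927")

-- ===== PRECONDITION & SPEC =====
def Spec_get_team_colors (team_name : String) (out : String × String) : Prop := out = get_team_colors_alt team_name
instance (team_name : String) (out : String × String) : Decidable (Spec_get_team_colors team_name out) := by unfold Spec_get_team_colors; infer_instance

-- ===== CLAIM (what is proved, stated in full; the proofs are below) =====
def Claim_equal_get_team_colors : Prop := ∀ (team_name : String), Dom_get_team_colors team_name → Spec_get_team_colors team_name (get_team_colors team_name)

-- ===== LEMMAS AND PROOFS =====

-- find? over an enumeration projects to find? over the list
theorem pv_find?_enumerate {C : Type} (L : List C) (s : Int) (pred : C → Bool) :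
    ((PySem.List.enumerate L s).find? (fun e => pred e.2)).map (fun e => e.2) = L.find? pred := by
  induction L generalizing s with
  | nil => simp [PySem.List.enumerate_nil]
  | cons x L ih =>
    rw [PySem.List.enumerate_cons]
    simp only [List.find?_cons]
    cases hp : pred x <;> simp [ih]

-- a found enumeration entry indexes its own payload in any map of the list
theorem pv_pyGet?_of_mem_enumerate {C β : Type} (L : List C) (f : C → β) (e : Int × C)
    (h : e ∈ PySem.List.enumerate L 0) : PySem.List.pyGet? (L.map f) e.1 = some (f e.2) := by
  obtain ⟨k, hk, rfl⟩ := (PySem.List.mem_enumerate_iff _ _ _).mp h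
  simp [hk]

-- lookup in a literal dict is the first matching pair
theorem pv_get?_mk {C : Type} (L : List (String × C)) (t : String) :
    (PySem.Dict.mk L).get? t = (L.find? (fun kv => kv.1 == t)).map (fun kv => kv.2) := by
  induction L with
  | nil => simp [PySem.Dict.get?]
  | cons kv L ih =>
    rw [PySem.Dict.get?_mk_cons, List.find?_cons]
    cases h : (kv.1 == t) <;> simp [ih]

-- setdefault-fold over a word list: lookup is the old binding, else the new value iff the word occurs
theorem pv_get?_foldl_setdefault {C : Type} (ws : List String) (d : PySem.Dict String C) (v : C) (p : String) :
    (ws.foldl (fun d w => d.setdefault w v) d).get? p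
      = (d.get? p).or (if p ∈ ws then some v else none) := by
  induction ws generalizing d with
  | nil => simp
  | cons w ws ih =>
    simp only [List.foldl_cons]
    rw [ih]
    by_cases hw : p = w
    · subst hw
      rw [PySem.Dict.get?_setdefault_self]
      cases d.get? p <;> simp
    · rw [PySem.Dict.get?_setdefault_of_ne _ _ hw]
      simp [List.mem_cons, hw]

-- building a word index: lookup of a word is the value at the first enumerated team whose name contains it
theorem pv_get?_build {C β : Type} (val : Int → String × C → β) (L : List (String × C)) (s : Int)
    (d : PySem.Dict String β) (p : String) :
    ((PySem.List.enumerate L s).foldl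
        (fun d e => (PySem.Str.split₀ e.2.1).foldl (fun d w => d.setdefault w (val e.1 e.2)) d) d).get? p
      = (d.get? p).or
          (((PySem.List.enumerate L s).find? (fun e => (PySem.Str.split₀ e.2.1).contains p)).map
            (fun e => val e.1 e.2)) := by
  induction L generalizing s d with
  | nil => simp [PySem.List.enumerate_nil]
  | cons x L ih =>
    rw [PySem.List.enumerate_cons]
    simp only [List.foldl_cons, List.find?_cons]
    rw [ih, pv_get?_foldl_setdefault]
    by_cases hc : (PySem.Str.split₀ x.1).contains p
    · have hm : p ∈ PySem.Str.split₀ x.1 := by simpa using hc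
      simp [hm]
    · have hm : p ∉ PySem.Str.split₀ x.1 := by simpa using hc
      simp [hm]

-- the literal word table IS the first-occurrence index built from A's table
set_option maxRecDepth 100000 in
theorem pvWords_eq : pvWords = (PySem.List.enumerate pvColorsMap.items 0).foldl
    (fun d e => (PySem.Str.split₀ e.2.1).foldl (fun d w => d.setdefault w e.1) d)
    PySem.Dict.empty := by decide

theorem pv_get?_pvWords (p : String) :
    pvWords.get? p =
    ((PySem.List.enumerate pvColorsMap.items 0).find?
        (fun e => (PySem.Str.split₀ e.2.1).contains p)).map (fun e => e.1) := by
  rw [pvWords_eq, pv_get?_build (val := fun i _ => i)]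
  simp [PySem.Dict.get?_empty]

-- the literal position table IS the name -> position view of A's table
set_option maxRecDepth 100000 in
theorem pvPos_eq : pvPos = PySem.Dict.mk
    ((PySem.List.enumerate pvColorsMap.items 0).map (fun e => (e.2.1, e.1))) := by decide

theorem pv_get?_pvPos (t : String) :
    pvPos.get? t =
    ((PySem.List.enumerate pvColorsMap.items 0).find? (fun e => e.2.1 == t)).map (fun e => e.1) := by
  rw [pvPos_eq, pv_get?_mk, List.find?_map, Option.map_map]
  rfl

-- core: the position of the first team matching a long query word = min of per-word earliest positions
theorem pv_main {C : Type} (parts : List String) (L : List (String × C)) (s : Int) :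
    (((PySem.List.enumerate L s).find? (fun e =>
        parts.any (fun p => (PySem.Str.split₀ e.2.1).contains p && decide (3 < PySem.Str.len p)))).map
      (fun e => e.1))
    = PySem.List.min?
        (parts.filterMap (fun p =>
          if decide (3 < PySem.Str.len p) then
            ((PySem.List.enumerate L s).find? (fun e => (PySem.Str.split₀ e.2.1).contains p)).map
              (fun e => e.1)
          else none))
        (fun i => i) := by
  induction L generalizing s with
  | nil =>
    rw [PySem.List.enumerate_nil]
    simp only [List.find?_nil, Option.map_none]
    rw [eq_comm, PySem.List.min?_eq_none_iff]
    simp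
  | cons x L ih =>
    rw [PySem.List.enumerate_cons]
    by_cases H : parts.any (fun p =>
        (PySem.Str.split₀ x.1).contains p && decide (3 < PySem.Str.len p)) = true
    · rw [List.find?_cons_of_pos (by simpa using H)]
      obtain ⟨p0, hp0m, hp0⟩ := List.any_eq_true.mp H
      have hp0c : (PySem.Str.split₀ x.1).contains p0 = true := (Bool.and_eq_true_iff.mp hp0).1
      have hp0l : decide (3 < PySem.Str.len p0) = true := (Bool.and_eq_true_iff.mp hp0).2
      set E' := PySem.List.enumerate L (s + 1) with hE'
      set f : String → Option Int := fun p =>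
        if decide (3 < PySem.Str.len p) then
          (((s, x) :: E').find? (fun e => (PySem.Str.split₀ e.2.1).contains p)).map (fun e => e.1)
        else none with hf
      have hmem : (s : Int) ∈ parts.filterMap f := by
        apply List.mem_filterMap.mpr
        refine ⟨p0, hp0m, ?_⟩
        simp only [hf, hp0l, if_true]
        rw [List.find?_cons_of_pos (by simpa using hp0c)]
        simp
      have hall : ∀ y ∈ parts.filterMap f, s ≤ y := by
        intro y hy
        obtain ⟨p, hpm, hpf⟩ := List.mem_filterMap.mp hy
        by_cases hl : decide (3 < PySem.Str.len p) = true
        · simp only [hf, hl, if_true] at hpf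
          obtain ⟨e, hefind, hey⟩ := Option.map_eq_some_iff.mp hpf
          have hem := List.mem_of_find?_eq_some hefind
          rcases List.mem_cons.mp hem with h | h
          · subst hey
            exact le_of_eq (by rw [h])
          · rw [hE'] at h
            obtain ⟨k, hk, rfl⟩ := (PySem.List.mem_enumerate_iff _ _ _).mp h
            subst hey
            show s ≤ s + 1 + (k : Int)
            omega
        · simp only [hf, hl] at hpf
          cases hpf
      rcases hm : PySem.List.min? (parts.filterMap f) (fun i => i) with _ | m
      · rw [PySem.List.min?_eq_none_iff] at hm
        rw [hm] at hmem
        cases hmem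
      · have h1 := PySem.List.min?_mem hm
        have h2 := PySem.List.min?_isMin hm _ hmem
        have h3 := hall m h1
        have hms : m = s := le_antisymm h2 h3
        rw [hms]
        rfl
    · rw [List.find?_cons_of_neg (by simpa using H)]
      have Hf : ∀ p ∈ parts,
          ((PySem.Str.split₀ x.1).contains p && decide (3 < PySem.Str.len p)) = false := by
        intro p hp
        have h2 := (List.any_eq_false.mp (Bool.eq_false_iff.mpr H)) p hp
        simpa using h2
      have hcong : parts.filterMap (fun p =>
            if decide (3 < PySem.Str.len p) then
              (((s, x) :: PySem.List.enumerate L (s + 1)).find?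
                  (fun e => (PySem.Str.split₀ e.2.1).contains p)).map (fun e => e.1)
            else none)
          = parts.filterMap (fun p =>
            if decide (3 < PySem.Str.len p) then
              ((PySem.List.enumerate L (s + 1)).find?
                  (fun e => (PySem.Str.split₀ e.2.1).contains p)).map (fun e => e.1)
            else none) := by
        apply List.filterMap_congr
        intro p hp
        by_cases hl : decide (3 < PySem.Str.len p) = true
        · have hcf : (PySem.Str.split₀ x.1).contains p = false := by
            have h2 := Hf p hp
            cases hc2 : (PySem.Str.split₀ x.1).contains p
            · rfl
            · rw [hc2, hl] at h2
              cases h2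
          simp only [hl, if_true]
          rw [List.find?_cons_of_neg (by simp only [Bool.not_eq_true]; exact hcf)]
        · rw [if_neg hl, if_neg hl]
      rw [hcong, ih (s + 1)]

-- the palette is the colors column of A's table
set_option maxRecDepth 100000 in
theorem pvPalette_eq : pvPalette = pvColorsMap.items.map (fun kv => kv.2) := by decide

-- ===== VERDICT (by name: the statement is the Claim_ definition above) =====
set_option maxHeartbeats 1600000 in
theorem get_team_colors_spec : Claim_equal_get_team_colors := by
  intro t _
  unfold Spec_get_team_colors get_team_colors get_team_colors_alt
  have hget : pvColorsMap.get? t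
      = ((PySem.List.enumerate pvColorsMap.items 0).find? (fun e => e.2.1 == t)).map
          (fun e => e.2.2) := by
    rw [pv_get?_mk pvColorsMap.items t,
        ← pv_find?_enumerate pvColorsMap.items 0 (fun kv => kv.1 == t), Option.map_map]
    rfl
  have hfun : (fun p => if decide (3 < PySem.Str.len p) && pvWords.contains p
                then pvWords.get? p else none)
      = (fun p => if decide (3 < PySem.Str.len p) then
          ((PySem.List.enumerate pvColorsMap.items 0).find?
              (fun e => (PySem.Str.split₀ e.2.1).contains p)).map (fun e => e.1)
        else none) := by
    funext p
    rw [← pv_get?_pvWords, PySem.Dict.contains_eq_isSome_get?]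
    cases h : pvWords.get? p <;> by_cases hl : decide (3 < PySem.Str.len p) = true <;>
      simp [*]
  cases hE : (PySem.List.enumerate pvColorsMap.items 0).find? (fun e => e.2.1 == t) with
  | some e =>
    have hp := pv_pyGet?_of_mem_enumerate pvColorsMap.items (fun kv => kv.2) e
      (List.mem_of_find?_eq_some hE)
    rw [hget, hE, pv_get?_pvPos, hE]
    simp only [Option.map_some]
    rw [pvPalette_eq, hp]
    rfl
  | none =>
    rw [hget, hE, pv_get?_pvPos, hE]
    simp only [Option.map_none, hfun]
    have key := pv_main (PySem.Str.split₀ t) pvColorsMap.items 0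
    have hAside := pv_find?_enumerate pvColorsMap.items 0 (fun kv =>
      (PySem.Str.split₀ t).any (fun part =>
        (PySem.Str.split₀ kv.1).contains part && decide (3 < PySem.Str.len part)))
    cases hF : (PySem.List.enumerate pvColorsMap.items 0).find? (fun e =>
        (PySem.Str.split₀ t).any (fun p =>
          (PySem.Str.split₀ e.2.1).contains p && decide (3 < PySem.Str.len p))) with
    | some e =>
      rw [hF] at key hAside
      have hp := pv_pyGet?_of_mem_enumerate pvColorsMap.items (fun kv => kv.2) e
        (List.mem_of_find?_eq_some hF)
      rw [← hAside, ← key]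
      simp only [Option.map_some]
      rw [pvPalette_eq, hp]
      rfl
    | none =>
      rw [hF] at key hAside
      rw [← hAside, ← key]
      rfl
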